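-- pv_equiv track=rewrite | github.com/Zivgl66/pythonWeatherApp | quizzes/sortballs.py | sort_balls_array
-- ===== SOURCE A (Python) =====
-- def sort_balls_array(balls_list):
--     list_green = []
--     list_yellow = []
--     list_red = []
--     for i in balls_list:
--         if i[0] == 'g':
--             list_green.append(i)
--         elif i[0] == 'y':
--             list_yellow.append(i)
--         else:
--             list_red.append(i)
--     return list_green + list_yellow + list_red
-- ===== SOURCE B (Python) =====
-- def sort_balls_array(balls_list):
--     return sorted(balls_list, key=lambda i: {'g': 0, 'y': 1}.get(i[0], 2))
-- ===== Notes on version B (the rewrite author's own statement) =====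
-- stated objective: idiomatic
-- what changed: Replaces the three-bucket append loop and concatenation with a single stable sort keyed on a color rank (g->0, y->1, other->2), relying on sort stability to preserve input order within each bucket.
import Mathlib
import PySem

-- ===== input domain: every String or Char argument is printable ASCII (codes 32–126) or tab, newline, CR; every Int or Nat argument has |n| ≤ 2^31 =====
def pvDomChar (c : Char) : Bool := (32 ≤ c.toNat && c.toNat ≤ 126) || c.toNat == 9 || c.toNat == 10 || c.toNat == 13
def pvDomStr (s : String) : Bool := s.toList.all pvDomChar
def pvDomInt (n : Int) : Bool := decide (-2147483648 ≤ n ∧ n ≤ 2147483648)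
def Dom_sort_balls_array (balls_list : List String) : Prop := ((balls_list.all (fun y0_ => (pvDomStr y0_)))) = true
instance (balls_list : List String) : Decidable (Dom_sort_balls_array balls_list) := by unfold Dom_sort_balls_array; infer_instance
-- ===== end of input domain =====

-- B replaces A's three-bucket append loop with one stable sort keyed on a color rank (idiomatic; same values).

-- ===== PORT A =====
-- A: three accumulator lists, one pass appending each ball to its bucket, then concatenation.
def sort_balls_array (balls_list : List String) : List String :=
  let st := balls_list.foldl
    (fun (acc : List String × List String × List String) i =>
      if PySem.Str.pyGet? i 0 = some 'g' then (acc.1 ++ [i], acc.2.1, acc.2.2)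
      else if PySem.Str.pyGet? i 0 = some 'y' then (acc.1, acc.2.1 ++ [i], acc.2.2)
      else (acc.1, acc.2.1, acc.2.2 ++ [i]))
    ([], [], [])
  st.1 ++ st.2.1 ++ st.2.2

-- ===== PORT B =====
-- key i = {'g': 0, 'y': 1}.get(i[0], 2); on the empty string Python raises (outside Pre_), the port returns 2.
def ballKey (i : String) : Int :=
  match PySem.Str.pyGet? i 0 with
  | some c => if c = 'g' then 0 else if c = 'y' then 1 else 2   -- {'g': 0, 'y': 1}.get(c, 2)
  | none => 2

def sort_balls_array_alt (balls_list : List String) : List String :=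
  PySem.List.sorted balls_list ballKey false

-- ===== PRECONDITION & SPEC =====
-- Pre_ excludes lists containing an empty string, on which Python A raises IndexError (i[0]).
def Pre_sort_balls_array (balls_list : List String) : Prop :=
  (balls_list.all (fun s => !(s == ""))) = true
instance (balls_list : List String) : Decidable (Pre_sort_balls_array balls_list) := by
  unfold Pre_sort_balls_array; infer_instance
def pvWitness_sort_balls_array : List String := ["green", "red", "yellow", "g2", "blue"]

def Spec_sort_balls_array (balls_list : List String) (out : List String) : Prop := out = sort_balls_array_alt balls_list
instance (balls_list : List String) (out : List String) : Decidable (Spec_sort_balls_array balls_list out) := by unfold Spec_sort_balls_array; infer_instance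

-- ===== CLAIM (what is proved, stated in full; the proofs are below) =====
def Claim_equal_sort_balls_array : Prop := ∀ (balls_list : List String), Dom_sort_balls_array balls_list → Pre_sort_balls_array balls_list → Spec_sort_balls_array balls_list (sort_balls_array balls_list)

-- ===== LEMMAS AND PROOFS =====

-- abbreviation used only in the proofs below
def pvIns (x : String) (acc : List String) : List String :=
  PySem.List.insertBy (fun a b => decide (ballKey a < ballKey b)) x acc

lemma pvIns_nil (x : String) : pvIns x [] = [x] := by
  simp [pvIns, PySem.List.insertBy]

lemma pvIns_cons (x y : String) (ys : List String) :
    pvIns x (y :: ys) =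
      if ballKey x < ballKey y then x :: y :: ys else y :: pvIns x ys := by
  simp [pvIns, PySem.List.insertBy]

-- skip a block none of whose elements come strictly after x's rank
lemma pvIns_append_skip (x : String) (l1 l2 : List String)
    (h : ∀ a ∈ l1, ¬ ballKey x < ballKey a) :
    pvIns x (l1 ++ l2) = l1 ++ pvIns x l2 := by
  induction l1 with
  | nil => simp
  | cons a t ih =>
      have ha : ¬ ballKey x < ballKey a := h a (by simp)
      simp [pvIns_cons, ha, ih (fun b hb => h b (by simp [hb]))]

-- x goes in front of a block whose every element ranks strictly after x
lemma pvIns_front (x : String) (l : List String)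
    (h : ∀ a ∈ l, ballKey x < ballKey a) :
    pvIns x l = x :: l := by
  cases l with
  | nil => simp [pvIns_nil]
  | cons a t => simp [pvIns_cons, h a (by simp)]

-- the loop invariant: B's insertion-sort fold over buckets g ++ y ++ r equals A's bucket fold
lemma pv_main (xs : List String) (g y r : List String)
    (hg : ∀ a ∈ g, ballKey a = 0) (hy : ∀ a ∈ y, ballKey a = 1) (hr : ∀ a ∈ r, ballKey a = 2) :
    xs.foldl (fun acc x => pvIns x acc) (g ++ y ++ r) =
      (xs.foldl
        (fun (acc : List String × List String × List String) i =>
          if PySem.Str.pyGet? i 0 = some 'g' then (acc.1 ++ [i], acc.2.1, acc.2.2)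
          else if PySem.Str.pyGet? i 0 = some 'y' then (acc.1, acc.2.1 ++ [i], acc.2.2)
          else (acc.1, acc.2.1, acc.2.2 ++ [i]))
        (g, y, r)).1 ++
      (xs.foldl
        (fun (acc : List String × List String × List String) i =>
          if PySem.Str.pyGet? i 0 = some 'g' then (acc.1 ++ [i], acc.2.1, acc.2.2)
          else if PySem.Str.pyGet? i 0 = some 'y' then (acc.1, acc.2.1 ++ [i], acc.2.2)
          else (acc.1, acc.2.1, acc.2.2 ++ [i]))
        (g, y, r)).2.1 ++
      (xs.foldl
        (fun (acc : List String × List String × List String) i =>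
          if PySem.Str.pyGet? i 0 = some 'g' then (acc.1 ++ [i], acc.2.1, acc.2.2)
          else if PySem.Str.pyGet? i 0 = some 'y' then (acc.1, acc.2.1 ++ [i], acc.2.2)
          else (acc.1, acc.2.1, acc.2.2 ++ [i]))
        (g, y, r)).2.2 := by
  induction xs generalizing g y r with
  | nil => simp
  | cons x t ih =>
      by_cases hxg : PySem.Str.pyGet? x 0 = some 'g'
      · have hkx : ballKey x = 0 := by
          have h' : PySem.List.pyGet? x.toList 0 = some 'g' := hxg
          simp [ballKey, h']
        have hstep : pvIns x (g ++ y ++ r) = (g ++ [x]) ++ y ++ r := by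
          rw [List.append_assoc, pvIns_append_skip x g (y ++ r)
            (fun a ha => by simp [hkx, hg a ha])]
          rw [pvIns_front x (y ++ r) (fun a ha => by
            rcases List.mem_append.mp ha with h' | h'
            · simp [hkx, hy a h']
            · simp [hkx, hr a h'])]
          simp
        simp only [List.foldl_cons, hxg, reduceIte, hstep]
        exact ih (g ++ [x]) y r
          (fun a ha => by rcases List.mem_append.mp ha with h' | h'
                          · exact hg a h'
                          · simp at h'; simpa [h'] using hkx)
          hy hr
      · by_cases hxy : PySem.Str.pyGet? x 0 = some 'y'
        · have hkx : ballKey x = 1 := by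
            have h' : PySem.List.pyGet? x.toList 0 = some 'y' := hxy
            simp [ballKey, h']
          have hstep : pvIns x (g ++ y ++ r) = g ++ (y ++ [x]) ++ r := by
            rw [List.append_assoc, pvIns_append_skip x g (y ++ r)
              (fun a ha => by simp [hkx, hg a ha])]
            rw [pvIns_append_skip x y r (fun a ha => by simp [hkx, hy a ha])]
            rw [pvIns_front x r (fun a ha => by simp [hkx, hr a ha])]
            simp
          simp only [List.foldl_cons, hxg, hxy, reduceIte, hstep]
          exact ih g (y ++ [x]) r hg
            (fun a ha => by rcases List.mem_append.mp ha with h' | h'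
                            · exact hy a h'
                            · simp at h'; simpa [h'] using hkx)
            hr
        · have hkx : ballKey x = 2 := by
            unfold ballKey
            cases hc : PySem.Str.pyGet? x 0 with
            | none => rfl
            | some c =>
                have hcg : c ≠ 'g' := by rintro rfl; exact hxg hc
                have hcy : c ≠ 'y' := by rintro rfl; exact hxy hc
                have h' : PySem.List.pyGet? x.toList 0 = some c := hc
                simp [h', hcg, hcy]
          have hstep : pvIns x (g ++ y ++ r) = g ++ y ++ (r ++ [x]) := by
            rw [List.append_assoc, pvIns_append_skip x g (y ++ r)
              (fun a ha => by simp [hkx, hg a ha])]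
            rw [pvIns_append_skip x y r (fun a ha => by simp [hkx, hy a ha])]
            rw [show pvIns x r = r ++ [x] from
              PySem.List.insertBy_of_forall_not_before _ x r
                (fun a ha => by simp [hkx, hr a ha])]
            simp
          simp only [List.foldl_cons, hxg, hxy, reduceIte, hstep]
          exact ih g y (r ++ [x]) hg hy
            (fun a ha => by rcases List.mem_append.mp ha with h' | h'
                            · exact hr a h'
                            · simp at h'; simpa [h'] using hkx)

-- ===== VERDICT (by name: the statement is the Claim_ definition above) =====
theorem sort_balls_array_spec : Claim_equal_sort_balls_array := by
  intro balls_list _ _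
  unfold Spec_sort_balls_array sort_balls_array sort_balls_array_alt
  rw [PySem.List.sorted_eq_foldl_insertBy]
  exact (pv_main balls_list [] [] [] (by simp) (by simp) (by simp)).symm
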